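-- pv_equiv track=rewrite | github.com/aiplan4eu/unified-planning | unified_planning/model/htn/ordering.py | _build_total_order
-- ===== SOURCE A (Python) =====
-- from typing import List, Set, Optional, Tuple
--
-- def _build_total_order(tasks: Set[str], precedences: List[Tuple[str, str]]) -> Optional[List[str]]:
--     """Returns a total order over all elements, or None if the given precedences are not sufficient to impose a total order."""
--     order = []
--     pending_tasks = tasks.copy()
--     pending_precedences = precedences.copy()
--
--     while len(pending_tasks) > 0:
--         # find all elements with no predecessors
--         firsts = [t for t in pending_tasks if all(tgt != t for (src, tgt) in pending_precedences)]
--         if len(firsts) != 1: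
--             return None  # not exactly one leading element => not a total order
--         first = firsts[0]
--         order.append(first)
--         # remove `first` from the pending tasks/constraints before continuing
--         pending_tasks.remove(first)
--         pending_precedences = [(src, tgt) for (src, tgt) in pending_precedences if src != first]
--
--     assert len(pending_tasks) == 0
--     assert len(order) == len(tasks)
--     assert set(order) == tasks
--     return order
-- ===== SOURCE B (Python) =====
-- from typing import List, Set, Optional, Tuple
--
-- def _build_total_order(tasks: Set[str], precedences: List[Tuple[str, str]]) -> Optional[List[str]]:
--     """Kahn-style: precompute in-degrees and adjacency once, then peel off the
--     unique zero-in-degree task at each step (exactly one required)."""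
--     indeg = {t: 0 for t in tasks}
--     adj = {t: [] for t in tasks}
--     for s, t in precedences:
--         if t in indeg:
--             indeg[t] += 1
--         if s in adj:
--             adj[s].append(t)
--     order = []
--     for _ in range(len(indeg)):
--         zeros = [t for t in indeg if indeg[t] == 0]
--         if len(zeros) != 1:
--             return None
--         u = zeros[0]
--         order.append(u)
--         del indeg[u]
--         for v in adj[u]:
--             if v in indeg:
--                 indeg[v] -= 1
--     return order
-- ===== Notes on version B (the rewrite author's own statement) =====
-- stated objective: faster
-- what changed: Replaces A's per-step rescan of all pending precedences for every pending task with a Kahn-style scheme: in-degree counts and adjacency lists are built in one pass over the precedences, each step picks the unique zero-in-degree pending task and decrements its successors' counts.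
import Mathlib
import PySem

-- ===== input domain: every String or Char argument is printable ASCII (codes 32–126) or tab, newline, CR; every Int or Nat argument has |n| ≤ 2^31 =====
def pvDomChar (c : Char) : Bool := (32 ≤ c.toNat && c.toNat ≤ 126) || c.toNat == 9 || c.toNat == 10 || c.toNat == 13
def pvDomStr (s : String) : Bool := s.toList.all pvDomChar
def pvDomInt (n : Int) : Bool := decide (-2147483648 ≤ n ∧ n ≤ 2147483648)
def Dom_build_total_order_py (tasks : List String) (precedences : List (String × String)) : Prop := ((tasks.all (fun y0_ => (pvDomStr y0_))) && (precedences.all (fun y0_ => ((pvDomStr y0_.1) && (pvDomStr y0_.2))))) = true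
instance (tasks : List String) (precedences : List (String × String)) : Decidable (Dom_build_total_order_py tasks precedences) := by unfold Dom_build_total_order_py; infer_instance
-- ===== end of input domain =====

-- B changes A's algorithm: in-degree counts and adjacency lists are built once, so the
-- per-step rescans of all pending precedences disappear (objective: faster).

-- ===== PORT A =====
-- while loop of A; fuel = |pending_tasks| (each iteration removes exactly one pending task)
def pvALoop : Nat → List String → List (String × String) → List String → Option (List String)
  | 0, _, _, order => some order
  | fuel + 1, pending, prec, order =>
    if pending.isEmpty then some order
    else
      -- firsts = [t for t in pending_tasks if all(tgt != t for (src, tgt) in pending_precedences)]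
      let firsts := pending.filter (fun t => prec.all (fun p => p.2 != t))
      match firsts with
      | [first] =>
        -- order.append(first); pending_tasks.remove(first); keep precedences with src != first
        pvALoop fuel (pending.erase first) (prec.filter (fun p => p.1 != first)) (order ++ [first])
      | _ => none  -- len(firsts) != 1

def build_total_order_py (tasks : List String) (precedences : List (String × String)) : Option (List String) :=
  pvALoop tasks.length tasks precedences []

-- ===== PORT B =====
-- main loop of B; fuel = range(len(indeg)), evaluated once
def pvBLoop : Nat → PySem.Dict String Int → PySem.Dict String (List String) → List String → Option (List String)
  | 0, _, _, order => some order
  | fuel + 1, indeg, adj, order =>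
    -- zeros = [t for t in indeg if indeg[t] == 0]
    let zeros := indeg.keys.filter (fun t => indeg.getD t 0 == 0)
    match zeros with
    | [u] =>
      -- order.append(u); del indeg[u]; for v in adj[u]: if v in indeg: indeg[v] -= 1
      let indeg' := (adj.getD u []).foldl
        (fun d v => if d.contains v then d.modify v 0 (· - 1) else d) (indeg.erase u)
      pvBLoop fuel indeg' adj (order ++ [u])
    | _ => none  -- len(zeros) != 1

-- indeg = {t: 0 for t in tasks}; for (s, t) in precedences: if t in indeg: indeg[t] += 1
def pvBIndeg (tasks : List String) (precedences : List (String × String)) : PySem.Dict String Int :=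
  precedences.foldl (fun d p => if d.contains p.2 then d.modify p.2 0 (· + 1) else d)
    (tasks.foldl (fun d t => d.insert t 0) PySem.Dict.empty)

-- adj = {t: [] for t in tasks};  for (s, t) in precedences: if s in adj: adj[s].append(t)
def pvBAdj (tasks : List String) (precedences : List (String × String)) : PySem.Dict String (List String) :=
  precedences.foldl (fun d p => if d.contains p.1 then d.modify p.1 [] (· ++ [p.2]) else d)
    (tasks.foldl (fun d t => d.insert t []) PySem.Dict.empty)

def build_total_order_py_alt (tasks : List String) (precedences : List (String × String)) : Option (List String) :=
  pvBLoop (pvBIndeg tasks precedences).size (pvBIndeg tasks precedences) (pvBAdj tasks precedences) []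

-- ===== PRECONDITION & SPEC =====
-- Python's `tasks` parameter is a set; its List encoding holds distinct elements, so Pre_
-- only states that (A is total; it returns on every such input).
def Pre_build_total_order_py (tasks : List String) (precedences : List (String × String)) : Prop :=
  tasks.Nodup
instance (tasks : List String) (precedences : List (String × String)) : Decidable (Pre_build_total_order_py tasks precedences) := by unfold Pre_build_total_order_py; infer_instance

def pvWitness_build_total_order_py : List String × (List (String × String)) :=
  (["a", "b", "c"], [("a", "b"), ("b", "c")])

def Spec_build_total_order_py (tasks : List String) (precedences : List (String × String)) (out : Option (List String)) : Prop := out = build_total_order_py_alt tasks precedences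
instance (tasks : List String) (precedences : List (String × String)) (out : Option (List String)) : Decidable (Spec_build_total_order_py tasks precedences out) := by unfold Spec_build_total_order_py; infer_instance

-- ===== CLAIM (what is proved, stated in full; the proofs are below) =====
def Claim_equal_build_total_order_py : Prop := ∀ (tasks : List String) (precedences : List (String × String)), Dom_build_total_order_py tasks precedences → Pre_build_total_order_py tasks precedences → Spec_build_total_order_py tasks precedences (build_total_order_py tasks precedences)

-- ===== LEMMAS AND PROOFS =====

-- countP splits along any second predicate
theorem pvCountPSplit {α : Type} (p q : α → Bool) (l : List α) :
    l.countP p = l.countP (fun a => p a && q a) + l.countP (fun a => p a && !q a) := by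
  induction l with
  | nil => rfl
  | cons x l ih =>
    by_cases hp : p x = true <;> by_cases hq : q x = true <;>
      simp [List.countP_cons, hp, hq, ih] <;> omega

-- keys of a dict are untouched by a guarded-modify fold
theorem pvKeysCondFold {ν α : Type} (key : α → String) (d0 : ν) (u : α → ν → ν) (l : List α)
    (d : PySem.Dict String ν) :
    (l.foldl (fun d p => if d.contains (key p) then (d.modify (key p) d0 (u p)) else d) d).keys
      = d.keys := by
  induction l generalizing d with
  | nil => rfl
  | cons x l ih =>
    simp only [List.foldl_cons]
    by_cases h : d.contains (key x) = true
    · rw [if_pos h, ih, PySem.Dict.keys_modify,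
        PySem.Dict.keys_insert_of_contains _ _ h]
    · rw [if_neg h, ih]

-- value at t after a guarded-modify fold adding g of the element
theorem pvGetDCondFoldInt {α : Type} (key : α → String) (g : α → Int) (l : List α)
    (d : PySem.Dict String Int) (t : String) :
    (l.foldl (fun d p => if d.contains (key p) then (d.modify (key p) 0 (· + g p)) else d) d).getD t 0
      = d.getD t 0 + (if d.contains t then ((l.filter (fun p => key p == t)).map g).sum else 0) := by
  induction l generalizing d with
  | nil => simp
  | cons x l ih =>
    simp only [List.foldl_cons]
    by_cases hc : d.contains (key x) = true
    · rw [if_pos hc, ih]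
      have hck : ∀ t', (d.modify (key x) 0 (· + g x)).contains t' = d.contains t' := by
        intro t'
        rw [PySem.Dict.contains_modify]
        by_cases h : t' = key x
        · subst h; simp [hc]
        · simp [h]
      rw [hck t, PySem.Dict.getD_modify]
      by_cases ht : t = key x
      · subst ht
        simp [hc, List.filter_cons]
        omega
      · have hkxt : (key x == t) = false := beq_eq_false_iff_ne.mpr (fun h => ht h.symm)
        simp [ht, List.filter_cons, hkxt]
    · rw [if_neg hc, ih]
      by_cases hct : d.contains t = true
      · have hkxt : (key x == t) = false := by
          refine beq_eq_false_iff_ne.mpr ?_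
          intro h; rw [h] at hc; exact hc hct
        simp [hct, List.filter_cons, hkxt]
      · simp [hct]

-- same for list-valued dicts that append
theorem pvGetDCondFoldApp (l : List (String × String))
    (d : PySem.Dict String (List String)) (t : String) :
    (l.foldl (fun d p => if d.contains p.1 then (d.modify p.1 [] (· ++ [p.2])) else d) d).getD t []
      = d.getD t [] ++ (if d.contains t then (l.filter (fun p => p.1 == t)).map (·.2) else []) := by
  induction l generalizing d with
  | nil => simp
  | cons x l ih =>
    simp only [List.foldl_cons]
    by_cases hc : d.contains x.1 = true
    · rw [if_pos hc, ih]
      have hck : ∀ t', (d.modify x.1 [] (· ++ [x.2])).contains t' = d.contains t' := by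
        intro t'
        rw [PySem.Dict.contains_modify]
        by_cases h : t' = x.1
        · subst h; simp [hc]
        · simp [h]
      rw [hck t, PySem.Dict.getD_modify]
      by_cases ht : t = x.1
      · subst ht; simp [hc, List.filter_cons]
      · have hkxt : (x.1 == t) = false := beq_eq_false_iff_ne.mpr (fun h => ht h.symm)
        simp [ht, List.filter_cons, hkxt]
    · rw [if_neg hc, ih]
      by_cases hct : d.contains t = true
      · have hkxt : (x.1 == t) = false := by
          refine beq_eq_false_iff_ne.mpr ?_
          intro h; rw [h] at hc; exact hc hct
        simp [hct, List.filter_cons, hkxt]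
      · simp [hct]

-- find? ignores a filter that keeps every possible match
theorem pvFindFilterNe {ν : Type} (items : List (String × ν)) (k t : String) (h : t ≠ k) :
    List.find? (fun p => p.1 == t) (items.filter (fun p => !(p.1 == k)))
      = List.find? (fun p => p.1 == t) items := by
  induction items with
  | nil => rfl
  | cons x l ih =>
    by_cases hx : (x.1 == t) = true
    · have hk : (x.1 == k) = false := by
        rw [beq_iff_eq] at hx; subst hx
        exact beq_eq_false_iff_ne.mpr h
      simp [List.filter_cons, hk, List.find?_cons, hx]
    · by_cases hk : (x.1 == k) = true <;>
        simp [List.filter_cons, hk, List.find?_cons, hx, ih]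

-- getD / keys through Dict.erase
theorem pvKeysErase {ν : Type} (d : PySem.Dict String ν) (k : String) :
    (d.erase k).keys = d.keys.filter (fun x => x != k) := by
  show (List.filter _ d.items).map _ = (d.items.map _).filter _
  induction d.items with
  | nil => rfl
  | cons x l ih =>
    by_cases h : (x.1 == k) = true <;> simp [List.filter_cons, h, bne, ih]

theorem pvGetDErase {ν : Type} (d : PySem.Dict String ν) (k t : String) (d0 : ν) (h : t ≠ k) :
    (d.erase k).getD t d0 = d.getD t d0 := by
  show (Option.map _ (List.find? _ (List.filter _ d.items))).getD d0
      = (Option.map _ (List.find? _ d.items)).getD d0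
  rw [pvFindFilterNe d.items k t h]

-- value at t after an initial constant-value insert fold
theorem pvGetDInsertConst {ν : Type} (c : ν) (l : List String) (d : PySem.Dict String ν)
    (t : String) :
    (l.foldl (fun d x => d.insert x c) d).getD t c = if t ∈ l then c else d.getD t c := by
  induction l generalizing d with
  | nil => simp
  | cons x l ih =>
    simp only [List.foldl_cons]
    rw [ih, PySem.Dict.getD_insert]
    by_cases h1 : t ∈ l <;> by_cases h2 : t = x <;> simp [h1, h2, List.mem_cons]

-- decrement fold: the value at a contained key drops by the number of its occurrences
theorem pvGetDDecFold (l : List String) (d : PySem.Dict String Int) (t : String) :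
    (l.foldl (fun d v => if d.contains v then (d.modify v 0 (· - 1)) else d) d).getD t 0
      = d.getD t 0 - (if d.contains t then (l.count t : Int) else 0) := by
  have h := pvGetDCondFoldInt (fun v : String => v) (fun _ => (-1 : Int)) l d t
  simp only [show (fun (d : PySem.Dict String Int) (v : String) =>
      if d.contains v then d.modify v 0 (· + (-1 : Int)) else d)
      = (fun d v => if d.contains v then d.modify v 0 (· - 1) else d) by
        funext d v; simp [Int.add_neg_eq_sub]] at h
  rw [h]
  by_cases hct : d.contains t = true
  · simp only [hct, if_pos]
    rw [List.count_eq_countP, PySem.List.sum_map_const_int]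
    simp [List.countP_eq_length_filter]
    ring
  · simp [hct]

-- the two loops agree under the simulation invariant
theorem pvLoopEq (fuel : Nat) (pending : List String) (prec : List (String × String))
    (indeg : PySem.Dict String Int) (adj : PySem.Dict String (List String))
    (order : List String)
    (hkeys : indeg.keys = pending)
    (hnd : pending.Nodup)
    (hfuel : fuel = pending.length)
    (hindeg : ∀ t ∈ pending, indeg.getD t 0 = (prec.countP (fun p => p.2 == t) : Int))
    (hadj : ∀ t ∈ pending, adj.getD t [] = (prec.filter (fun p => p.1 == t)).map (·.2)) :
    pvALoop fuel pending prec order = pvBLoop fuel indeg adj order := by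
  induction fuel generalizing pending prec indeg order with
  | zero => rfl
  | succ fuel ih =>
    have hne : pending ≠ [] := by
      intro h; subst h; simp at hfuel
    have hie : pending.isEmpty = false := by
      cases pending
      · exact absurd rfl hne
      · rfl
    have hzf : indeg.keys.filter (fun t => indeg.getD t 0 == 0)
        = pending.filter (fun t => prec.all (fun p => p.2 != t)) := by
      rw [hkeys]
      apply List.filter_congr
      intro t ht
      rw [hindeg t ht]
      by_cases h : prec.countP (fun p => p.2 == t) = 0
      · have hall : prec.all (fun p => p.2 != t) = true := by
          rw [List.countP_eq_zero] at h
          simp only [List.all_eq_true]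
          intro p hp
          simpa [bne] using h p hp
        simp [h, hall]
      · have hall : prec.all (fun p => p.2 != t) = false := by
          rw [List.all_eq_false]
          rw [List.countP_eq_zero] at h
          push_neg at h
          obtain ⟨p, hp, hpt⟩ := h
          exact ⟨p, hp, by simpa [bne] using hpt⟩
        have hI : ((prec.countP (fun p => p.2 == t) : Int) == 0) = false := by
          rw [beq_eq_false_iff_ne]
          exact_mod_cast h
        simp [hall, hI]
    simp only [pvALoop, pvBLoop, hie, Bool.false_eq_true, if_false]
    rw [hzf]
    cases hf : pending.filter (fun t => prec.all (fun p => p.2 != t)) with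
    | nil => rfl
    | cons first rest =>
      cases rest with
      | cons b r => rfl
      | nil =>
        -- the singleton case: both loops recurse
        have hfp : first ∈ pending := by
          have : first ∈ pending.filter (fun t => prec.all (fun p => p.2 != t)) := by
            rw [hf]; exact List.mem_singleton.mpr rfl
          exact List.mem_of_mem_filter this
        have herase : pending.erase first = pending.filter (fun x => x != first) :=
          List.Nodup.erase_eq_filter hnd first
        show pvALoop fuel (pending.erase first) (prec.filter (fun p => p.1 != first))
            (order ++ [first])
          = pvBLoop fuel ((adj.getD first []).foldl
              (fun d v => if d.contains v then d.modify v 0 (· - 1) else d)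
              (indeg.erase first)) adj (order ++ [first])
        apply ih
        · rw [pvKeysCondFold (fun v : String => v) 0 (fun _ => (· - 1)), pvKeysErase, hkeys,
            herase]
        · exact hnd.erase first
        · rw [List.length_erase_of_mem hfp]; omega
        · -- in-degree invariant after the step
          intro t ht
          have htp : t ∈ pending := List.mem_of_mem_erase ht
          have htne : t ≠ first := by
            rw [herase] at ht
            simpa [bne] using List.of_mem_filter ht
          have hcont : (indeg.erase first).contains t = true := by
            rw [PySem.Dict.contains_eq_decide_mem_keys, pvKeysErase, hkeys, ← herase]
            simpa using ht
          rw [pvGetDDecFold, hcont, if_pos rfl, pvGetDErase _ _ _ _ htne, hindeg t htp,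
            hadj first hfp]
          have hcnt : ((prec.filter (fun p => p.1 == first)).map (·.2)).count t
              = prec.countP (fun p => p.2 == t && p.1 == first) := by
            rw [List.count_eq_countP, List.countP_map, List.countP_filter]
            congr 1
          have hsplit := pvCountPSplit (fun p : String × String => p.2 == t)
            (fun p => p.1 == first) prec
          have hnew : (prec.filter (fun p => p.1 != first)).countP (fun p => p.2 == t)
              = prec.countP (fun p => p.2 == t && !(p.1 == first)) := by
            rw [List.countP_filter]; congr 1
          rw [hcnt, hnew]
          push_cast [hsplit]
          ring
        · -- adjacency invariant after the step
          intro t ht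
          have htp : t ∈ pending := List.mem_of_mem_erase ht
          have htne : t ≠ first := by
            rw [herase] at ht
            simpa [bne] using List.of_mem_filter ht
          rw [hadj t htp, List.filter_filter]
          congr 1
          apply List.filter_congr
          intro p _
          by_cases h : (p.1 == t) = true
          · rw [beq_iff_eq] at h
            simp [h, htne, bne]
          · simp [h]

-- ===== VERDICT (by name: the statement is the Claim_ definition above) =====
theorem build_total_order_py_spec : Claim_equal_build_total_order_py := by
  intro tasks precedences _ hpre
  unfold Spec_build_total_order_py build_total_order_py build_total_order_py_alt
  have hnd : tasks.Nodup := hpre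
  have hk0 : (tasks.foldl (fun d t => d.insert t (0 : Int)) PySem.Dict.empty).keys = tasks := by
    rw [PySem.Dict.keys_foldl_insert]
    simpa [PySem.Set.update, PySem.Set.ofList] using PySem.Set.ofList_eq_self_of_nodup tasks hnd
  have hka0 : (tasks.foldl (fun d t => d.insert t ([] : List String)) PySem.Dict.empty).keys
      = tasks := by
    rw [PySem.Dict.keys_foldl_insert]
    simpa [PySem.Set.update, PySem.Set.ofList] using PySem.Set.ofList_eq_self_of_nodup tasks hnd
  have hk1 : (pvBIndeg tasks precedences).keys = tasks := by
    unfold pvBIndeg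
    rw [pvKeysCondFold (fun p : String × String => p.2) 0 (fun _ => (· + 1)), hk0]
  have hsize : (pvBIndeg tasks precedences).size = tasks.length := by
    have h : (pvBIndeg tasks precedences).keys.length = tasks.length := by rw [hk1]
    simpa [PySem.Dict.keys, PySem.Dict.size] using h
  rw [hsize]
  apply pvLoopEq
  · exact hk1
  · exact hnd
  · rfl
  · intro t ht
    have hc0 : (tasks.foldl (fun d t => d.insert t (0 : Int)) PySem.Dict.empty).contains t
        = true := by
      rw [PySem.Dict.contains_eq_decide_mem_keys, hk0]; simpa using ht
    unfold pvBIndeg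
    rw [pvGetDCondFoldInt (fun p : String × String => p.2) (fun _ => (1 : Int)), hc0,
      if_pos rfl, pvGetDInsertConst, if_pos ht, PySem.List.sum_map_const_int]
    simp [List.countP_eq_length_filter]
  · intro t ht
    have hc0 : (tasks.foldl (fun d t => d.insert t ([] : List String)) PySem.Dict.empty).contains t
        = true := by
      rw [PySem.Dict.contains_eq_decide_mem_keys, hka0]; simpa using ht
    unfold pvBAdj
    rw [pvGetDCondFoldApp, hc0, if_pos rfl, pvGetDInsertConst, if_pos ht, List.nil_append]
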